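-- pv_equiv track=rewrite | github.com/MrBrantCode/unitest_baseline | mut_generate/mist_train_cf/cf_71698/solution.py | encode_to_runes
-- ===== SOURCE A (Python) =====
-- def encode_to_runes(text):
--     runes = {
--         "a": "ᚠ",    # Rune represents wealth
--         "b": "ᚢ",    # Rune represents aurochs, a form of wild cattle
--         "c": "ᚦ",    # Rune represents thorn or a giant
--         "d": "ᚩ",    # Rune refers to a god and a mouth
--         "e": "ᚱ",    # Rune represents riding
--     }
--     encoded_text = ""
--     for character in text:
--         if character.lower() in runes:
--             encoded_text += runes[character.lower()]
--         else:
--             encoded_text += character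
--     return encoded_text
-- ===== SOURCE B (Python) =====
-- _PAIRS = [(c, r)
--           for k, r in (("a", "\u16a0"), ("b", "\u16a2"), ("c", "\u16a6"),
--                        ("d", "\u16a9"), ("e", "\u16b1"))
--           for c in (k, k.upper())]
--
-- def encode_to_runes(text):
--     # staged passes: one whole-string replace per letter/case variant; safe
--     # because no rune is ever a source letter of a later pass
--     for ch, rune in _PAIRS:
--         text = text.replace(ch, rune)
--     return text
-- ===== Notes on version B (the rewrite author's own statement) =====
-- stated objective: faster
-- what changed: Replaces A's single per-character lower()/dict-membership/string-append loop with ten staged whole-string replace passes, one per case-variant letter, correct because no rune is a source letter of a later pass.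
import Mathlib
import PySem

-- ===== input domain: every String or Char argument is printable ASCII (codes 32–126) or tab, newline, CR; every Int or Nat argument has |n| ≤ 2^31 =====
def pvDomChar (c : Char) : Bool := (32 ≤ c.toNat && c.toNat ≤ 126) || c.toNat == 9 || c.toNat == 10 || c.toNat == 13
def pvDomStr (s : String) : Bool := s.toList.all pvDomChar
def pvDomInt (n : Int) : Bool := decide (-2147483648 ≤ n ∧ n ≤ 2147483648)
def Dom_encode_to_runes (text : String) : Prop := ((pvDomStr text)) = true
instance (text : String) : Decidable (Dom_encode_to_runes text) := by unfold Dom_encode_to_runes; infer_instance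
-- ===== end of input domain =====

-- B replaces A's single per-character lower()/membership/append loop with ten staged
-- whole-string replace passes (one per case-variant letter); alternative decomposition.

-- ===== PORT A =====
-- the runes dict of A (values as rune strings, kept as List Char so '+=' is '++')
def runesA : PySem.Dict Char (List Char) :=
  PySem.Dict.ofList [('a', ['ᚠ']), ('b', ['ᚢ']), ('c', ['ᚦ']), ('d', ['ᚩ']), ('e', ['ᚱ'])]

def encode_to_runes (text : String) : String :=
  String.ofList <| text.toList.foldl (fun encoded character =>
    if runesA.contains (PySem.Chars.lowerChar character) then
      encoded ++ runesA.getD (PySem.Chars.lowerChar character) []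
    else
      encoded ++ [character]) []

-- ===== PORT B =====
-- B's pass list: one (letter, rune) pair per case variant, in Source B's order
def runePairs : List (String × String) :=
  [("a", "ᚠ"), ("A", "ᚠ"), ("b", "ᚢ"), ("B", "ᚢ"), ("c", "ᚦ"), ("C", "ᚦ"),
   ("d", "ᚩ"), ("D", "ᚩ"), ("e", "ᚱ"), ("E", "ᚱ")]

-- staged passes: text = text.replace(ch, rune) for each pair, in order
def encode_to_runes_alt (text : String) : String :=
  runePairs.foldl (fun t p => PySem.Str.replace t p.1 p.2) text

-- ===== PRECONDITION & SPEC =====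
def Spec_encode_to_runes (text : String) (out : String) : Prop := out = encode_to_runes_alt text
instance (text : String) (out : String) : Decidable (Spec_encode_to_runes text out) := by unfold Spec_encode_to_runes; infer_instance

-- ===== CLAIM =====
def Claim_equal_encode_to_runes : Prop := ∀ (text : String), Dom_encode_to_runes text → Spec_encode_to_runes text (encode_to_runes text)

-- ===== LEMMAS AND PROOFS =====

-- single-character substitution, the effect of one of B's passes on one character
def substc (o n c : Char) : Char := if c = o then n else c

-- the composite of B's ten passes on one character (innermost pass first)
def compB (c : Char) : Char :=
  substc 'E' 'ᚱ' (substc 'e' 'ᚱ' (substc 'D' 'ᚩ' (substc 'd' 'ᚩ' (substc 'C' 'ᚦ'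
    (substc 'c' 'ᚦ' (substc 'B' 'ᚢ' (substc 'b' 'ᚢ' (substc 'A' 'ᚠ' (substc 'a' 'ᚠ' c)))))))))

theorem go_single (o n : Char) : ∀ (fuel : Nat) (l acc : List Char), l.length ≤ fuel →
    PySem.Chars.replace.go [o] [n] fuel l acc
      = acc.reverse ++ l.map (substc o n) := by
  intro fuel
  induction fuel with
  | zero => intro l acc h; simp at h; simp [h, PySem.Chars.replace.go]
  | succ f ih =>
    intro l acc h
    cases l with
    | nil => simp [PySem.Chars.replace.go]
    | cons c t =>
      simp only [PySem.Chars.replace.go]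
      by_cases hc : c = o
      · simp [substc, hc, List.isPrefixOf, ih t _ (by simpa using h)]
      · simp [substc, List.isPrefixOf, hc, ih t _ (by simpa using h)]
        exact fun h' => absurd h'.symm hc

theorem replace_single (o n : Char) (l : List Char) :
    PySem.Chars.replace l [o] [n] = l.map (substc o n) := by
  simp [PySem.Chars.replace, List.isEmpty, go_single o n l.length l [] le_rfl]

-- B's staged passes amount to the composite per-character map
theorem altB_eq (text : String) :
    (encode_to_runes_alt text).toList = text.toList.map compB := by
  simp [encode_to_runes_alt, runePairs, PySem.Str.toList_replace, replace_single,
    List.map_map, compB, Function.comp_def]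

-- A's per-character result, as a single-character function
def stepA (c : Char) : List Char :=
  if runesA.contains (PySem.Chars.lowerChar c) then runesA.getD (PySem.Chars.lowerChar c) []
  else [c]

-- on every ASCII-range character A's step is the singleton of B's composite map
set_option maxRecDepth 4000 in
theorem stepA_eq_compB (c : Char) (h : c.toNat < 128) :
    stepA c = [compB c] := by
  have key : ∀ n : Fin 128, stepA (Char.ofNat n.val) = [compB (Char.ofNat n.val)] := by decide
  have := key ⟨c.toNat, h⟩
  simpa [Char.ofNat_toNat] using this

theorem foldl_stepA (l : List Char) (acc : List Char) :
    l.foldl (fun encoded character =>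
      if runesA.contains (PySem.Chars.lowerChar character) then
        encoded ++ runesA.getD (PySem.Chars.lowerChar character) []
      else
        encoded ++ [character]) acc = acc ++ (l.map stepA).flatten := by
  induction l generalizing acc with
  | nil => simp
  | cons x xs ih =>
    simp only [List.foldl_cons, List.map_cons, List.flatten_cons, ih, stepA]
    split_ifs <;> simp

-- flatten of per-character singletons is the composite map, once each character is ASCII
theorem flatten_stepA (l : List Char) (hall : ∀ c ∈ l, c.toNat < 128) :
    (l.map stepA).flatten = l.map compB := by
  induction l with
  | nil => rfl
  | cons x xs ih =>
    simp only [List.map_cons, List.flatten_cons]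
    rw [stepA_eq_compB x (hall x (by simp)), ih (fun c hc => hall c (by simp [hc]))]
    rfl

-- ===== VERDICT =====
theorem encode_to_runes_spec : Claim_equal_encode_to_runes := by
  intro text hdom
  unfold Spec_encode_to_runes encode_to_runes
  have hall : ∀ c ∈ text.toList, c.toNat < 128 := by
    intro c hc
    have := List.all_eq_true.mp hdom c hc
    simp only [pvDomChar, Bool.or_eq_true, Bool.and_eq_true, decide_eq_true_eq, beq_iff_eq] at this
    omega
  rw [foldl_stepA, flatten_stepA text.toList hall, List.nil_append]
  have := altB_eq text
  apply String.toList_injective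
  rw [String.toList_ofList]
  exact this.symm
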